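-- pv_equiv track=rewrite | github.com/keyvanz0413/9900-H16C-Cake | email-agent/tools/urgency.py | _select_category
-- ===== SOURCE A (Python) =====
-- def _select_category(categories: list[str]) -> str:
--     """Choose one main category from matched signals."""
--     order = [
--         "security",
--         "billing",
--         "deadline",
--         "meeting",
--         "follow_up",
--         "application",
--         "promotion",
--         "newsletter",
--         "verification",
--         "person",
--         "unread",
--         "automated",
--         "general",
--     ]
--     for category in order:
--         if category in categories:
--             return category
--     return "general"
-- ===== SOURCE B (Python) =====
-- _RANK = {
--     "security": 0,
--     "billing": 1,
--     "deadline": 2,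
--     "meeting": 3,
--     "follow_up": 4,
--     "application": 5,
--     "promotion": 6,
--     "newsletter": 7,
--     "verification": 8,
--     "person": 9,
--     "unread": 10,
--     "automated": 11,
--     "general": 12,
-- }
--
--
-- def _select_category(categories: list[str]) -> str:
--     """Choose one main category from matched signals."""
--     best = "general"
--     for category in categories:
--         if _RANK.get(category, 13) < _RANK.get(best, 13):
--             best = category
--     return best
-- ===== Notes on version B (the rewrite author's own statement) =====
-- stated objective: alternative
-- what changed: A scans the fixed 13-entry priority list doing one membership test over the input per entry; B builds a name-to-priority dict once and makes a single pass over the input, keeping the category with the smallest priority index.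
import Mathlib
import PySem

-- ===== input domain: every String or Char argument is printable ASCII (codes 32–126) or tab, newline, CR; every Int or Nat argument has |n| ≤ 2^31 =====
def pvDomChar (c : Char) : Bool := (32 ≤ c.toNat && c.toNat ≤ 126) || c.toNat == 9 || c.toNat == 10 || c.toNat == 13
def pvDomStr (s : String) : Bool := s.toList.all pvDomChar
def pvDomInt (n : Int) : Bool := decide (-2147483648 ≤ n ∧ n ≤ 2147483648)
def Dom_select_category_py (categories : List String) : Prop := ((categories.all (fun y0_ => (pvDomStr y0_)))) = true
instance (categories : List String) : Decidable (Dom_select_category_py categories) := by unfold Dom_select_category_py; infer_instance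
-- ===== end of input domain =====

-- B replaces A's scan of the fixed priority list (one membership test in `categories` per priority)
-- by a single pass over the input keeping the best-ranked category seen so far, via a rank dictionary.

-- ===== PORT A =====
-- the fixed `order` list of A
def pvOrder : List String :=
  ["security", "billing", "deadline", "meeting", "follow_up", "application", "promotion",
   "newsletter", "verification", "person", "unread", "automated", "general"]

-- `for category in order: if category in categories: return category` / `return "general"`
def pvSelLoop : List String → List String → String
  | [], _ => "general"
  | o :: os, cats => if cats.contains o then o else pvSelLoop os cats

def select_category_py (categories : List String) : String :=
  pvSelLoop pvOrder categories

-- ===== PORT B =====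
-- the `_RANK` dict of B
def pvRankD : PySem.Dict String Nat := PySem.Dict.ofList
  [("security", 0), ("billing", 1), ("deadline", 2), ("meeting", 3), ("follow_up", 4),
   ("application", 5), ("promotion", 6), ("newsletter", 7), ("verification", 8),
   ("person", 9), ("unread", 10), ("automated", 11), ("general", 12)]

-- `_RANK.get(c, 13)`
def pvRank (c : String) : Nat := pvRankD.getD c 13

-- `best = "general"; for category in categories: if rank(category) < rank(best): best = category`
def select_category_py_alt (categories : List String) : String :=
  categories.foldl (fun best c => if pvRank c < pvRank best then c else best) "general"

-- ===== PRECONDITION & SPEC =====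
def Spec_select_category_py (categories : List String) (out : String) : Prop := out = select_category_py_alt categories
instance (categories : List String) (out : String) : Decidable (Spec_select_category_py categories out) := by unfold Spec_select_category_py; infer_instance

-- ===== CLAIM (what is proved, stated in full; the proofs are below) =====
def Claim_equal_select_category_py : Prop := ∀ (categories : List String), Dom_select_category_py categories → Spec_select_category_py categories (select_category_py categories)

-- ===== LEMMAS AND PROOFS =====

theorem pvRank_general : pvRank "general" = 12 := rfl

-- each string is one of the 13 ranked keys (with its rank) or unranked (rank 13)
theorem pvRank_cases (c : String) :
    (c = "security" ∧ pvRank c = 0) ∨ (c = "billing" ∧ pvRank c = 1) ∨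
    (c = "deadline" ∧ pvRank c = 2) ∨ (c = "meeting" ∧ pvRank c = 3) ∨
    (c = "follow_up" ∧ pvRank c = 4) ∨ (c = "application" ∧ pvRank c = 5) ∨
    (c = "promotion" ∧ pvRank c = 6) ∨ (c = "newsletter" ∧ pvRank c = 7) ∨
    (c = "verification" ∧ pvRank c = 8) ∨ (c = "person" ∧ pvRank c = 9) ∨
    (c = "unread" ∧ pvRank c = 10) ∨ (c = "automated" ∧ pvRank c = 11) ∨
    (c = "general" ∧ pvRank c = 12) ∨ (c ∉ pvOrder ∧ pvRank c = 13) := by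
  by_cases h0 : c = "security"
  · exact Or.inl ⟨h0, by subst h0; rfl⟩
  by_cases h1 : c = "billing"
  · exact Or.inr (Or.inl ⟨h1, by subst h1; rfl⟩)
  by_cases h2 : c = "deadline"
  · exact Or.inr (Or.inr (Or.inl ⟨h2, by subst h2; rfl⟩))
  by_cases h3 : c = "meeting"
  · exact Or.inr (Or.inr (Or.inr (Or.inl ⟨h3, by subst h3; rfl⟩)))
  by_cases h4 : c = "follow_up"
  · exact Or.inr (Or.inr (Or.inr (Or.inr (Or.inl ⟨h4, by subst h4; rfl⟩))))
  by_cases h5 : c = "application"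
  · exact Or.inr (Or.inr (Or.inr (Or.inr (Or.inr (Or.inl ⟨h5, by subst h5; rfl⟩)))))
  by_cases h6 : c = "promotion"
  · exact Or.inr (Or.inr (Or.inr (Or.inr (Or.inr (Or.inr (Or.inl ⟨h6, by subst h6; rfl⟩))))))
  by_cases h7 : c = "newsletter"
  · exact Or.inr (Or.inr (Or.inr (Or.inr (Or.inr (Or.inr (Or.inr (Or.inl ⟨h7, by subst h7; rfl⟩)))))))
  by_cases h8 : c = "verification"
  · exact Or.inr (Or.inr (Or.inr (Or.inr (Or.inr (Or.inr (Or.inr (Or.inr (Or.inl ⟨h8, by subst h8; rfl⟩))))))))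
  by_cases h9 : c = "person"
  · exact Or.inr (Or.inr (Or.inr (Or.inr (Or.inr (Or.inr (Or.inr (Or.inr (Or.inr (Or.inl ⟨h9, by subst h9; rfl⟩)))))))))
  by_cases h10 : c = "unread"
  · exact Or.inr (Or.inr (Or.inr (Or.inr (Or.inr (Or.inr (Or.inr (Or.inr (Or.inr (Or.inr (Or.inl ⟨h10, by subst h10; rfl⟩))))))))))
  by_cases h11 : c = "automated"
  · exact Or.inr (Or.inr (Or.inr (Or.inr (Or.inr (Or.inr (Or.inr (Or.inr (Or.inr (Or.inr (Or.inr (Or.inl ⟨h11, by subst h11; rfl⟩)))))))))))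
  by_cases h12 : c = "general"
  · exact Or.inr (Or.inr (Or.inr (Or.inr (Or.inr (Or.inr (Or.inr (Or.inr (Or.inr (Or.inr (Or.inr (Or.inr (Or.inl ⟨h12, by subst h12; rfl⟩))))))))))))
  refine Or.inr (Or.inr (Or.inr (Or.inr (Or.inr (Or.inr (Or.inr (Or.inr (Or.inr (Or.inr (Or.inr (Or.inr (Or.inr ⟨?_, ?_⟩))))))))))))
  · simp [pvOrder, h0, h1, h2, h3, h4, h5, h6, h7, h8, h9, h10, h11, h12]
  · have hh : pvRankD = PySem.Dict.mk
      [("security", 0), ("billing", 1), ("deadline", 2), ("meeting", 3), ("follow_up", 4),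
       ("application", 5), ("promotion", 6), ("newsletter", 7), ("verification", 8),
       ("person", 9), ("unread", 10), ("automated", 11), ("general", 12)] := rfl
    simp only [pvRank, hh, PySem.Dict.getD_eq_get?_getD, PySem.Dict.get?_mk_cons]
    simp [beq_iff_eq, Ne.symm h0, Ne.symm h1, Ne.symm h2, Ne.symm h3, Ne.symm h4, Ne.symm h5,
          Ne.symm h6, Ne.symm h7, Ne.symm h8, Ne.symm h9, Ne.symm h10, Ne.symm h11, Ne.symm h12]
    rfl

-- a rank ≤ 12 identifies the string
theorem pvRank_det {x y : String} (hx : pvRank x ≤ 12) (h : pvRank x = pvRank y) : x = y := by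
  rcases pvRank_cases x with ⟨e, r⟩|⟨e, r⟩|⟨e, r⟩|⟨e, r⟩|⟨e, r⟩|⟨e, r⟩|⟨e, r⟩|⟨e, r⟩|⟨e, r⟩|⟨e, r⟩|⟨e, r⟩|⟨e, r⟩|⟨e, r⟩|⟨e, r⟩ <;>
    rcases pvRank_cases y with ⟨e', r'⟩|⟨e', r'⟩|⟨e', r'⟩|⟨e', r'⟩|⟨e', r'⟩|⟨e', r'⟩|⟨e', r'⟩|⟨e', r'⟩|⟨e', r'⟩|⟨e', r'⟩|⟨e', r'⟩|⟨e', r'⟩|⟨e', r'⟩|⟨e', r'⟩ <;>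
    first
      | omega
      | rw [e, e']

-- the rank of an order element is its position in the order list
theorem pvOrder_rank (i : Nat) (o : String) (h : pvOrder[i]? = some o) : pvRank o = i := by
  have hi : i < pvOrder.length := by
    rcases List.getElem?_eq_some_iff.mp h with ⟨hlt, _⟩
    exact hlt
  have hlen : pvOrder.length = 13 := rfl
  rw [hlen] at hi
  interval_cases i <;> simp only [pvOrder] at h <;> simp at h <;> subst h <;> rfl

-- A's loop returns "general" or an element of the scanned list that occurs in `categories`
theorem pvSelLoop_mem (os cats : List String) :
    pvSelLoop os cats = "general" ∨
      (pvSelLoop os cats ∈ os ∧ cats.contains (pvSelLoop os cats) = true) := by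
  induction os with
  | nil => exact Or.inl rfl
  | cons o os ih =>
    by_cases h : cats.contains o = true
    · have hres : pvSelLoop (o :: os) cats = o := by simp only [pvSelLoop, h, if_true]
      rw [hres]
      exact Or.inr ⟨List.mem_cons_self, h⟩
    · simp only [pvSelLoop, h]
      rcases ih with hg | ⟨hm, hc⟩
      · exact Or.inl hg
      · exact Or.inr ⟨List.mem_cons_of_mem _ hm, hc⟩

-- A's loop returns an element no later in the scanned list than any element of `categories`
theorem pvSelLoop_min (os cats : List String) (o : String) (ho : o ∈ os)
    (hc : cats.contains o = true) :
    ∃ (i j : Nat), os[i]? = some (pvSelLoop os cats) ∧ os[j]? = some o ∧ i ≤ j := by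
  induction os with
  | nil => cases ho
  | cons o' os ih =>
    by_cases h : cats.contains o' = true
    · obtain ⟨j, hj⟩ := List.getElem?_of_mem ho
      refine ⟨0, j, ?_, hj, Nat.zero_le j⟩
      simp only [pvSelLoop, h, if_true, List.getElem?_cons_zero]
    · have ho' : o ∈ os := by
        rcases List.mem_cons.mp ho with rfl | hm
        · exact absurd hc h
        · exact hm
      obtain ⟨i, j, hi, hj, hij⟩ := ih ho'
      refine ⟨i + 1, j + 1, ?_, ?_, by omega⟩
      · simp only [pvSelLoop, h, List.getElem?_cons_succ]
        exact hi
      · simp only [List.getElem?_cons_succ]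
        exact hj

-- A's result has rank at most 12
theorem pvA_rank_le (cs : List String) : pvRank (select_category_py cs) ≤ 12 := by
  rcases pvSelLoop_mem pvOrder cs with hg | ⟨hm, _⟩
  · show pvRank (pvSelLoop pvOrder cs) ≤ 12
    rw [hg, pvRank_general]
  · obtain ⟨j, hj⟩ := List.getElem?_of_mem hm
    have hlt : j < pvOrder.length := by
      rcases List.getElem?_eq_some_iff.mp hj with ⟨hlt, _⟩
      exact hlt
    have hlen : pvOrder.length = 13 := rfl
    have := pvOrder_rank j _ hj
    show pvRank (pvSelLoop pvOrder cs) ≤ 12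
    omega

-- A's result has minimal rank among the members of `categories`
theorem pvA_min (cs : List String) (o : String) (hc : cs.contains o = true) :
    pvRank (select_category_py cs) ≤ pvRank o := by
  have h12 := pvA_rank_le cs
  by_cases hm : o ∈ pvOrder
  · obtain ⟨i, j, hi, hj, hij⟩ := pvSelLoop_min pvOrder cs o hm hc
    have ha := pvOrder_rank i _ hi
    have hb := pvOrder_rank j _ hj
    show pvRank (pvSelLoop pvOrder cs) ≤ pvRank o
    omega
  · rcases pvRank_cases o with ⟨e, r⟩|⟨e, r⟩|⟨e, r⟩|⟨e, r⟩|⟨e, r⟩|⟨e, r⟩|⟨e, r⟩|⟨e, r⟩|⟨e, r⟩|⟨e, r⟩|⟨e, r⟩|⟨e, r⟩|⟨e, r⟩|⟨e, r⟩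
    all_goals first
      | omega
      | (subst e; exact absurd (by decide) hm)

-- B's fold never increases the rank of the accumulator
theorem pvB_rank_le (cs : List String) :
    ∀ best : String,
      pvRank (cs.foldl (fun best c => if pvRank c < pvRank best then c else best) best) ≤
        pvRank best := by
  induction cs with
  | nil => intro best; simp
  | cons c cs ih =>
    intro best
    rw [List.foldl_cons]
    by_cases h : pvRank c < pvRank best
    · rw [if_pos h]
      have := ih c
      omega
    · rw [if_neg h]
      exact ih best

-- B's result has minimal rank among the members of `categories`
theorem pvB_min (cs : List String) :
    ∀ best o : String, cs.contains o = true →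
      pvRank (cs.foldl (fun best c => if pvRank c < pvRank best then c else best) best) ≤
        pvRank o := by
  induction cs with
  | nil => intro best o hc; cases hc
  | cons c cs ih =>
    intro best o hc
    rw [List.foldl_cons]
    rcases (by simpa using hc : o = c ∨ cs.contains o = true) with rfl | hc'
    · by_cases h : pvRank o < pvRank best
      · rw [if_pos h]
        have := pvB_rank_le cs o
        omega
      · rw [if_neg h]
        have := pvB_rank_le cs best
        omega
    · by_cases h : pvRank c < pvRank best
      · rw [if_pos h]; exact ih c o hc'
      · rw [if_neg h]; exact ih best o hc'

-- B's result is the initial accumulator or a member of `categories`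
theorem pvB_mem (cs : List String) :
    ∀ best : String,
      cs.foldl (fun best c => if pvRank c < pvRank best then c else best) best = best ∨
        cs.contains
          (cs.foldl (fun best c => if pvRank c < pvRank best then c else best) best) = true := by
  induction cs with
  | nil => intro best; exact Or.inl rfl
  | cons c cs ih =>
    intro best
    rw [List.foldl_cons]
    by_cases h : pvRank c < pvRank best
    · rw [if_pos h]
      rcases ih c with he | hc
      · right; simp [he]
      · have hm : (cs.foldl (fun best c => if pvRank c < pvRank best then c else best) c) ∈ cs := by
          simpa using hc
        right; simp [hm]
    · rw [if_neg h]
      rcases ih best with he | hc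
      · exact Or.inl he
      · have hm : (cs.foldl (fun best c => if pvRank c < pvRank best then c else best) best) ∈ cs := by
          simpa using hc
        right; simp [hm]

-- ===== VERDICT (by name: the statement is the Claim_ definition above) =====
theorem select_category_py_spec : Claim_equal_select_category_py := by
  intro categories _
  unfold Spec_select_category_py select_category_py_alt
  have ha12 := pvA_rank_le categories
  have hb12 : pvRank (categories.foldl
      (fun best c => if pvRank c < pvRank best then c else best) "general") ≤ 12 := by
    have := pvB_rank_le categories "general"
    rw [pvRank_general] at this
    exact this
  have hab : pvRank (select_category_py categories) ≤ pvRank (categories.foldl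
      (fun best c => if pvRank c < pvRank best then c else best) "general") := by
    rcases pvB_mem categories "general" with he | hc
    · rw [he, pvRank_general]; exact ha12
    · exact pvA_min categories _ hc
  have hba : pvRank (categories.foldl
      (fun best c => if pvRank c < pvRank best then c else best) "general") ≤
      pvRank (select_category_py categories) := by
    rcases pvSelLoop_mem pvOrder categories with hg | ⟨_, hc⟩
    · show _ ≤ pvRank (pvSelLoop pvOrder categories)
      rw [hg, pvRank_general]; exact hb12
    · exact pvB_min categories "general" _ hc
  exact pvRank_det ha12 (by omega)
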